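-- pv_equiv track=rewrite | github.com/Ncarlson27/Analysis-of-Algorithms-Final | simulated_annealing.py | _conflicted_rows_cols
-- ===== SOURCE A (Python) =====
-- def _row_duplicates(vals: list[int]) -> int:
--     """Return the number of duplicates in a row/column.
--        If all numbers are unique, then it'll return 0."""
--
--     # Faster than Counter for small fixed sizes
--     seen = set()
--     dup = 0
--     for v in vals:
--         if v in seen:
--             dup += 1
--         else:
--             seen.add(v)
--     return dup
--
-- def _conflicted_rows_cols(board: list, n: int):
--     """Returns the sets of row indices and column indices that currently have conflicts."""
--     N = n * n
--     bad_rows, bad_cols = set(), set()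
--     for r in range(N):
--         if _row_duplicates(board[r]) > 0:
--             bad_rows.add(r)
--     for c in range(N):
--         col = [board[r][c] for r in range(N)]
--         if _row_duplicates(col) > 0:
--             bad_cols.add(c)
--     return bad_rows, bad_cols
-- ===== SOURCE B (Python) =====
-- def _step(st, v):
--     seen, bad = st
--     if v in seen:
--         return (seen, True)
--     return (seen | {v}, bad)
--
-- def _conflicted_rows_cols(board: list, n: int):
--     """Single row-major sweep: per-column (seen, bad) states carried with zip,
--     row duplicates detected with an early-exit scan; no transposed column lists."""
--     N = n * n
--     col_state = [(set(), False) for _ in range(N)]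
--     bad_rows = set()
--     for r in range(N):
--         row = board[r]
--         seen = set()
--         for v in row:
--             if v in seen:
--                 bad_rows.add(r)
--                 break
--             seen.add(v)
--         col_state = [_step(st, v) for st, v in zip(col_state, row)]
--     bad_cols = {c for c, (_seen, bad) in enumerate(col_state) if bad}
--     return bad_rows, bad_cols
-- ===== Notes on version B (the rewrite author's own statement) =====
-- stated objective: alternative
-- what changed: Replaces A's two separate passes (row scan with a duplicate-counting helper, then building each transposed column list and rescanning) with a single row-major sweep that carries per-column (seen, bad) states via zip and an early-exit row scan, so no column lists are ever materialized.
import Mathlib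
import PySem

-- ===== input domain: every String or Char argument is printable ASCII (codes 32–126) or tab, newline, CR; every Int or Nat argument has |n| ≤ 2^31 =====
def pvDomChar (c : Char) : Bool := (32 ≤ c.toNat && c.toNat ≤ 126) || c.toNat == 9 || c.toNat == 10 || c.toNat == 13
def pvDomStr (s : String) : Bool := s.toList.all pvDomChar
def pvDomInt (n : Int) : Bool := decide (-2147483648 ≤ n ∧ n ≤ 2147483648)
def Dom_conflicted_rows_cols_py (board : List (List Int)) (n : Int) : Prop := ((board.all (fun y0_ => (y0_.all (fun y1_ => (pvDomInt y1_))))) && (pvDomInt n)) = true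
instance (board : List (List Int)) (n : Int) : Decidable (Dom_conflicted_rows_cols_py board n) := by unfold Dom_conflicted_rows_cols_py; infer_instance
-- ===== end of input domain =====

-- B replaces A's two separate passes (rows, then per-column transposed lists) by one
-- row-major sweep carrying per-column (seen, bad) states; objective: alternative decomposition.

-- ===== PORT A =====
def row_duplicates_py (vals : List Int) : Int :=
  (vals.foldl
    (fun (st : PySem.Set Int × Int) v =>
      if PySem.Set.contains st.1 v then (st.1, st.2 + 1) else (PySem.Set.add st.1 v, st.2))
    (PySem.Set.empty, 0)).2

def conflicted_rows_cols_py (board : List (List Int)) (n : Int) : List Int × List Int :=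
  let N := n * n
  let bad_rows := (PySem.List.pyRange 0 N 1).foldl
    (fun s r =>
      if row_duplicates_py (PySem.List.pyGetD board r []) > 0 then PySem.Set.add s r else s)
    PySem.Set.empty
  let bad_cols := (PySem.List.pyRange 0 N 1).foldl
    (fun s c =>
      let col := (PySem.List.pyRange 0 N 1).map
        (fun r => PySem.List.pyGetD (PySem.List.pyGetD board r []) c 0)
      if row_duplicates_py col > 0 then PySem.Set.add s c else s)
    PySem.Set.empty
  (bad_rows, bad_cols)

-- ===== PORT B =====
def step_alt (st : PySem.Set Int × Bool) (v : Int) : PySem.Set Int × Bool :=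
  if PySem.Set.contains st.1 v then (st.1, true) else (PySem.Set.add st.1 v, st.2)

-- the 'for v in row: … break' scan of Source B, as structural recursion
def rowHasDup_alt (seen : PySem.Set Int) : List Int → Bool
  | [] => false
  | v :: vs => if PySem.Set.contains seen v then true else rowHasDup_alt (PySem.Set.add seen v) vs

def conflicted_rows_cols_py_alt (board : List (List Int)) (n : Int) : List Int × List Int :=
  let N := n * n
  let init : List (PySem.Set Int × Bool) :=
    (PySem.List.pyRange 0 N 1).map (fun _ => (PySem.Set.empty, false))
  let st := (PySem.List.pyRange 0 N 1).foldl
    (fun (st : List (PySem.Set Int × Bool) × PySem.Set Int) r =>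
      let row := PySem.List.pyGetD board r []
      ( List.zipWith step_alt st.1 row,
        if rowHasDup_alt PySem.Set.empty row then PySem.Set.add st.2 r else st.2 ))
    (init, PySem.Set.empty)
  let bad_cols := (PySem.List.enumerate st.1).foldl
    (fun s p => if p.2.2 then PySem.Set.add s p.1 else s) PySem.Set.empty
  (st.2, bad_cols)

-- ===== PRECONDITION & SPEC =====
-- Pre_ excludes exactly the inputs where A raises IndexError: boards with fewer than n²
-- rows, or one of the first n² rows shorter than n² (the column pass reads board[r][c]).
def Pre_conflicted_rows_cols_py (board : List (List Int)) (n : Int) : Prop :=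
  n * n ≤ (board.length : Int) ∧
  ∀ row ∈ board.take (n * n).toNat, n * n ≤ (row.length : Int)
instance (board : List (List Int)) (n : Int) : Decidable (Pre_conflicted_rows_cols_py board n) := by
  unfold Pre_conflicted_rows_cols_py; infer_instance

def pvWitness_conflicted_rows_cols_py : List (List Int) × Int :=
  ([[1, 2, 1, 3], [2, 2, 3, 4], [3, 4, 1, 2], [4, 3, 2, 1]], 2)

def Spec_conflicted_rows_cols_py (board : List (List Int)) (n : Int) (out : List Int × List Int) : Prop := out = conflicted_rows_cols_py_alt board n
instance (board : List (List Int)) (n : Int) (out : List Int × List Int) : Decidable (Spec_conflicted_rows_cols_py board n out) := by unfold Spec_conflicted_rows_cols_py; infer_instance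

-- ===== CLAIM (what is proved, stated in full; the proofs are below) =====
def Claim_equal_conflicted_rows_cols_py : Prop := ∀ (board : List (List Int)) (n : Int), Dom_conflicted_rows_cols_py board n → Pre_conflicted_rows_cols_py board n → Spec_conflicted_rows_cols_py board n (conflicted_rows_cols_py board n)

-- ===== LEMMAS AND PROOFS =====

-- A's duplicate counter exceeds its start iff B's early-exit scan fires
theorem rdp_mono (vals : List Int) (s : PySem.Set Int) (d : Int) :
    d ≤ (vals.foldl
      (fun (st : PySem.Set Int × Int) v =>
        if PySem.Set.contains st.1 v then (st.1, st.2 + 1) else (PySem.Set.add st.1 v, st.2))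
      (s, d)).2 := by
  induction vals generalizing s d with
  | nil => simp
  | cons v vs ih =>
    simp only [List.foldl_cons]
    split
    · exact le_trans (by omega) (ih s (d + 1))
    · exact ih (PySem.Set.add s v) d

theorem rdp_iff (vals : List Int) (s : PySem.Set Int) (d : Int) :
    (d < (vals.foldl
      (fun (st : PySem.Set Int × Int) v =>
        if PySem.Set.contains st.1 v then (st.1, st.2 + 1) else (PySem.Set.add st.1 v, st.2))
      (s, d)).2) ↔ rowHasDup_alt s vals = true := by
  induction vals generalizing s d with
  | nil => simp [rowHasDup_alt]
  | cons v vs ih =>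
    simp only [List.foldl_cons, rowHasDup_alt]
    split
    · simp only [iff_true]
      exact lt_of_lt_of_le (by omega) (rdp_mono vs s (d + 1))
    · exact ih (PySem.Set.add s v) d

theorem rdp_pos_iff (vals : List Int) :
    (0 < row_duplicates_py vals) ↔ rowHasDup_alt PySem.Set.empty vals = true := by
  exact rdp_iff vals PySem.Set.empty 0

-- column-state fold: second component records whether a duplicate was seen
theorem step_alt_snd (col : List Int) (s : PySem.Set Int) (b : Bool) :
    (col.foldl step_alt (s, b)).2 = (b || rowHasDup_alt s col) := by
  induction col generalizing s b with
  | nil => simp [rowHasDup_alt]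
  | cons v vs ih =>
    simp only [List.foldl_cons, step_alt, rowHasDup_alt]
    split
    · simp [ih]
    · exact ih (PySem.Set.add s v) b

-- fold over range with getD = fold over the taken prefix
theorem foldl_range_getD {β : Type} (g : β → List Int → β) (board : List (List Int)) :
    ∀ (M : Nat) (i : β), M ≤ board.length →
    (List.range M).foldl (fun a k => g a (board.getD k [])) i = (board.take M).foldl g i := by
  intro M
  induction M with
  | zero => intro i _; simp
  | succ m ih =>
    intro i h
    have hm : m < board.length := by omega
    rw [List.range_succ, List.foldl_append, ih i (by omega), List.take_add_one,
        List.getElem?_eq_getElem hm, List.foldl_append]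
    simp only [List.foldl_cons, List.foldl_nil, Option.toList_some]
    congr 1
    simp [List.getD, List.getElem?_eq_getElem hm]

-- the transpose lemma: folding zipWith over rows, read at column c
theorem zip_transpose {S : Type} (f : S → Int → S) :
    ∀ (rows : List (List Int)) (cs : List S),
      (∀ row ∈ rows, cs.length ≤ row.length) →
      (rows.foldl (fun a row => List.zipWith f a row) cs).length = cs.length ∧
      ∀ (c : Nat) (d : S), c < cs.length →
        (rows.foldl (fun a row => List.zipWith f a row) cs).getD c d
          = (rows.map (fun row => row.getD c 0)).foldl f (cs.getD c d) := by
  intro rows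
  induction rows with
  | nil => intro cs _; exact ⟨rfl, fun c d _ => rfl⟩
  | cons row rest ih =>
    intro cs h
    have hlen : (List.zipWith f cs row).length = cs.length := by
      rw [List.length_zipWith]
      exact Nat.min_eq_left (h row (by simp))
    obtain ⟨ihlen, ihget⟩ := ih (List.zipWith f cs row) (by
      intro r hr; rw [hlen]; exact h r (by simp [hr]))
    constructor
    · simpa [hlen] using ihlen
    · intro c d hc
      simp only [List.foldl_cons, List.map_cons]
      rw [ihget c d (by omega)]
      congr 1
      have hc2 : c < row.length := lt_of_lt_of_le hc (h row (by simp))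
      simp [List.getD, List.getElem?_zipWith, List.getElem?_eq_getElem hc,
        List.getElem?_eq_getElem hc2]

-- a fold with two independent accumulators is two folds
theorem pair_fold {σ τ ρ : Type} (F : σ → ρ → σ) (G : τ → ρ → τ) (l : List ρ) (a : σ) (b : τ) :
    l.foldl (fun s e => (F s.1 e, G s.2 e)) (a, b) = (l.foldl F a, l.foldl G b) := by
  induction l generalizing a b with
  | nil => rfl
  | cons x xs ih => simp [ih]

-- map over range with getD = map over the taken prefix
theorem map_range_getD {β : Type} (h : List Int → β) (board : List (List Int)) (M : Nat)
    (hM : M ≤ board.length) :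
    (List.range M).map (fun k => h (board.getD k [])) = (board.take M).map h := by
  apply List.ext_getElem
  · simp [Nat.min_eq_left hM]
  · intro i h1 h2
    have hi : i < M := by simpa using h1
    have hib : i < board.length := lt_of_lt_of_le hi hM
    simp only [List.getElem_map, List.getElem_range, List.getElem_take]
    congr 1
    simp [List.getD, List.getElem?_eq_getElem hib]

-- the main equality, assembled from the lemmas above
theorem main_eq (board : List (List Int)) (n : Int)
    (hb : n * n ≤ (board.length : Int))
    (hrows : ∀ row ∈ board.take (n * n).toNat, n * n ≤ (row.length : Int)) :
    conflicted_rows_cols_py board n = conflicted_rows_cols_py_alt board n := by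
  have hnn : (0 : Int) ≤ n * n := mul_self_nonneg n
  set M := (n * n).toNat with hM
  have hNM : n * n = (M : Int) := (Int.toNat_of_nonneg hnn).symm
  have hMb : M ≤ board.length := Int.toNat_le.mpr hb
  have hR : PySem.List.pyRange 0 (n * n) 1 = (List.range M).map (fun k : Nat => (k : Int)) := by
    rw [PySem.List.pyRange_one]; simp [hM]
  have hrowsM : ∀ row ∈ board.take M, M ≤ row.length := by
    intro row hr; exact Int.toNat_le.mpr (hrows row hr)
  -- initial column state is a replicate
  have hinit : ((PySem.List.pyRange 0 (n * n) 1).map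
      (fun _ => ((PySem.Set.empty : PySem.Set Int), false)))
      = List.replicate M ((PySem.Set.empty : PySem.Set Int), false) := by
    rw [hR, List.map_map,
        show ((fun _ : Int => ((PySem.Set.empty : PySem.Set Int), false)) ∘ (fun k : Nat => (k : Int)))
           = (fun _ : Nat => ((PySem.Set.empty : PySem.Set Int), false)) from rfl,
        List.map_const', List.length_range]
  simp only [conflicted_rows_cols_py, conflicted_rows_cols_py_alt]
  rw [pair_fold (F := fun a r => List.zipWith step_alt a (PySem.List.pyGetD board r []))
      (G := fun s2 r => if rowHasDup_alt PySem.Set.empty (PySem.List.pyGetD board r []) = true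
            then PySem.Set.add s2 r else s2), hinit]
  -- name the two sides' pieces
  obtain ⟨hlen, hget⟩ := zip_transpose step_alt (board.take M)
    (List.replicate M ((PySem.Set.empty : PySem.Set Int), false))
    (by intro row hr; simpa using hrowsM row hr)
  have hcs : (PySem.List.pyRange 0 (n * n) 1).foldl
      (fun a r => List.zipWith step_alt a (PySem.List.pyGetD board r []))
      (List.replicate M ((PySem.Set.empty : PySem.Set Int), false))
      = (board.take M).foldl (fun a row => List.zipWith step_alt a row)
        (List.replicate M ((PySem.Set.empty : PySem.Set Int), false)) := by
    rw [hR, List.foldl_map]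
    simp only [PySem.List.pyGetD_natCast]
    exact foldl_range_getD (fun a row => List.zipWith step_alt a row) board M _ hMb
  simp only [Prod.mk.injEq]
  constructor
  · -- bad_rows
    rw [hR, List.foldl_map, List.foldl_map]
    apply PySem.List.foldl_congr_mem
    intro acc k _
    simp [rdp_pos_iff]
  · -- bad_cols
    rw [hcs]
    rw [PySem.List.enumerate_eq_map_pyRange (d := ((PySem.Set.empty : PySem.Set Int), false)),
        List.foldl_map]
    have hlenc : ((board.take M).foldl (fun a row => List.zipWith step_alt a row)
        (List.replicate M ((PySem.Set.empty : PySem.Set Int), false))).length = M := by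
      rw [hlen]; simp
    have hlen2 : (PySem.List.len ((board.take M).foldl (fun a row => List.zipWith step_alt a row)
        (List.replicate M ((PySem.Set.empty : PySem.Set Int), false)))) = n * n := by
      rw [show ∀ (ys : List (PySem.Set Int × Bool)), PySem.List.len ys = (ys.length : Int) from
            fun ys => by simp, hlenc]
      exact hNM.symm
    rw [hlen2, hR, List.foldl_map, List.foldl_map]
    apply PySem.List.foldl_congr_mem
    intro acc k hk
    have hkM : k < M := List.mem_range.mp hk
    have hcol : (((List.range M).map (fun k : Nat => (k : Int))).map
        (fun r => PySem.List.pyGetD (PySem.List.pyGetD board r []) (k : Int) 0))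
        = (board.take M).map (fun row => row.getD k 0) := by
      rw [List.map_map]
      simp only [Function.comp_def, PySem.List.pyGetD_natCast]
      exact map_range_getD (fun row => row.getD k 0) board M hMb
    rw [hcol]
    simp only [PySem.List.pyGetD_natCast]
    rw [hget k ((PySem.Set.empty : PySem.Set Int), false) (by simpa using hkM)]
    have hrep : (List.replicate M ((PySem.Set.empty : PySem.Set Int), false)).getD k
        ((PySem.Set.empty : PySem.Set Int), false) = ((PySem.Set.empty : PySem.Set Int), false) := by
      simp [List.getD, hkM]
    rw [hrep]
    simp [step_alt_snd, rdp_pos_iff]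

-- ===== VERDICT (by name: the statement is the Claim_ definition above) =====
theorem conflicted_rows_cols_py_spec : Claim_equal_conflicted_rows_cols_py := by
  intro board n _hdom hpre
  unfold Spec_conflicted_rows_cols_py
  exact main_eq board n hpre.1 hpre.2
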